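-- pv_equiv track=rewrite | github.com/RSV48/algorithms | task_04_01.py | mWhile
-- ===== SOURCE A (Python) =====
-- def arrayMatrix(num, array):
--     result_matrix = []
--     for i in range(0, num):
--         result_matrix.append([array[i][j] for j in range(0, num)])
--     return result_matrix
--
-- def mWhile(num, array):
--     matrix = arrayMatrix(num, array)
--     max_el = None
--     j = 0
--     while j < len(matrix[0]):
--         min_el = matrix[0][j]
--         i = 0
--         while i < len(matrix):
--             min_el = matrix[i][j] if matrix[i][j] < min_el else min_el
--             i += 1
--         if max_el is None or max_el < min_el:
--             max_el = min_el
--         j += 1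
--     return max_el
-- ===== SOURCE B (Python) =====
-- def mWhile(num, array):
--     col_min = [array[0][j] for j in range(num)]
--     for i in range(1, num):
--         row = array[i]
--         col_min = [row[j] if row[j] < m else m for j, m in enumerate(col_min)]
--     return max(col_min)
-- ===== Notes on version B (the rewrite author's own statement) =====
-- stated objective: idiomatic
-- what changed: Drops A's materialized num-by-num matrix copy and its column-by-column nested while scans: B keeps one vector of running column minima, updated by a comprehension in a single row-major pass over rows 1..num-1, then returns max(col_min) via the builtin (A also re-scans row 0 in every column; B does not).
import Mathlib
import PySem

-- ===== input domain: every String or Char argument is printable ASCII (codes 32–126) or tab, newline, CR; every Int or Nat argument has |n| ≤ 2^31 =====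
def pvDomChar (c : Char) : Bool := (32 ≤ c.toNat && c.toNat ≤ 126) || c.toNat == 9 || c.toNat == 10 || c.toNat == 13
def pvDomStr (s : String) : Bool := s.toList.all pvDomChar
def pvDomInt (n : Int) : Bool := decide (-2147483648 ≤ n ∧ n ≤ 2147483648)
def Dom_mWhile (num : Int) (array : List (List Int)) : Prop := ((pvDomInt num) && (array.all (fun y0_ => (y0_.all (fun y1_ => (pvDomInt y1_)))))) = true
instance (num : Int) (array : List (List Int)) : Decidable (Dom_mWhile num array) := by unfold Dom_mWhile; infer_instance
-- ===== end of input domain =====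

-- B drops A's materialized num-by-num matrix copy and its column-by-column nested while
-- scans: one row-major pass folds every column's minimum into a single vector, then one max
-- (objective: idiomatic; same result wherever A returns).

-- ===== PORT A =====
def pvArrayMatrix (num : Int) (array : List (List Int)) : List (List Int) :=
  (PySem.List.pyRange 0 num 1).foldl
    (fun res i => res ++ [(PySem.List.pyRange 0 num 1).map
      (fun j => ((PySem.List.pyGet? ((PySem.List.pyGet? array i).getD []) j).getD 0))]) []

-- 'if max_el is None or max_el < min_el: max_el = min_el'
def pvMaxUpd (max_el : Option Int) (min_el : Int) : Option Int :=
  match max_el with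
  | none => some min_el
  | some m => if m < min_el then some min_el else some m

def mWhile (num : Int) (array : List (List Int)) : Int :=
  let matrix := pvArrayMatrix num array
  let res := (List.range ((PySem.List.pyGet? matrix 0).getD []).length).foldl
    (fun (max_el : Option Int) (j : Nat) =>
      let min_el0 := (PySem.List.pyGet? ((PySem.List.pyGet? matrix 0).getD []) (j : Int)).getD 0
      let min_el := matrix.foldl
        (fun min_el row =>
          if (PySem.List.pyGet? row (j : Int)).getD 0 < min_el
          then (PySem.List.pyGet? row (j : Int)).getD 0 else min_el) min_el0
      pvMaxUpd max_el min_el) none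
  res.getD 0

-- ===== PORT B =====
def mWhile_alt (num : Int) (array : List (List Int)) : Int :=
  let colMin := (PySem.List.pyRange 0 num).map
    (fun j => (PySem.List.pyGet? ((PySem.List.pyGet? array 0).getD []) j).getD 0)
  let colMin := (PySem.List.pyRange 1 num).foldl
    (fun cm i =>
      (PySem.List.enumerate cm).map
        (fun p => if (PySem.List.pyGet? ((PySem.List.pyGet? array i).getD []) p.1).getD 0 < p.2
                  then (PySem.List.pyGet? ((PySem.List.pyGet? array i).getD []) p.1).getD 0
                  else p.2)) colMin
  (PySem.List.max? colMin (fun x => x)).getD 0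

-- ===== PRECONDITION & SPEC =====
-- Pre_ excludes exactly the inputs where A raises: num < 1 (matrix[0] IndexError),
-- fewer than num rows, or a row among the first num shorter than num (IndexError in arrayMatrix).
def Pre_mWhile (num : Int) (array : List (List Int)) : Prop :=
  1 ≤ num ∧ num ≤ (array.length : Int) ∧
  ∀ row ∈ array.take num.toNat, num ≤ (row.length : Int)
instance (num : Int) (array : List (List Int)) : Decidable (Pre_mWhile num array) := by
  unfold Pre_mWhile; infer_instance

def pvWitness_mWhile : Int × List (List Int) := (2, [[1, 5], [3, 2], [9]])

def Spec_mWhile (num : Int) (array : List (List Int)) (out : Int) : Prop := out = mWhile_alt num array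
instance (num : Int) (array : List (List Int)) (out : Int) : Decidable (Spec_mWhile num array out) := by unfold Spec_mWhile; infer_instance

-- ===== CLAIM (what is proved, stated in full; the proofs are below) =====
def Claim_equal_mWhile : Prop := ∀ (num : Int) (array : List (List Int)), Dom_mWhile num array → Pre_mWhile num array → Spec_mWhile num array (mWhile num array)

-- ===== LEMMAS AND PROOFS =====

-- entry i j of the input, with junk defaults (only in-range uses matter under Pre_)
def pvE (array : List (List Int)) (i j : Nat) : Int := (array.getD i []).getD j 0

-- the shared per-column min-update step
def pvMin (m v : Int) : Int := if v < m then v else m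

theorem pvMin_self (m : Int) : pvMin m m = m := by simp [pvMin]

-- one comprehension step over the enumerated minima vector, against a long-enough row
theorem map_enum_min (n : Nat) (c : Nat → Int) (row : List Int) (h : n ≤ row.length) :
    (PySem.List.enumerate ((List.range n).map c)).map
      (fun p => if (PySem.List.pyGet? row p.1).getD 0 < p.2
                then (PySem.List.pyGet? row p.1).getD 0 else p.2)
      = (List.range n).map (fun j => pvMin (c j) (row.getD j 0)) := by
  apply List.ext_getElem
  · simp [PySem.List.length_enumerate]
  · intro k h1 h2
    have hk : k < n := by simpa [PySem.List.length_enumerate] using h1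
    have hkr : k < row.length := lt_of_lt_of_le hk h
    simp [PySem.List.getElem_enumerate, PySem.List.pyGet?_natCast,
      List.getElem?_eq_getElem hkr, pvMin, List.getD_eq_getElem?_getD, hk]

-- the fold of comprehension steps is the map of per-column folds
theorem foldl_enum_eq_map (array : List (List Int)) (n : Nat) (l : List Int)
    (h : ∀ i ∈ l, n ≤ ((PySem.List.pyGet? array i).getD []).length) (c : Nat → Int) :
    l.foldl (fun cm i =>
        (PySem.List.enumerate cm).map
          (fun p => if (PySem.List.pyGet? ((PySem.List.pyGet? array i).getD []) p.1).getD 0 < p.2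
                    then (PySem.List.pyGet? ((PySem.List.pyGet? array i).getD []) p.1).getD 0
                    else p.2))
      ((List.range n).map c)
      = (List.range n).map (fun j =>
          l.foldl (fun m i => pvMin m (((PySem.List.pyGet? array i).getD []).getD j 0)) (c j)) := by
  induction l generalizing c with
  | nil => rfl
  | cons x t ih =>
      simp only [List.foldl_cons]
      rw [map_enum_min n c _ (h x (by simp))]
      rw [ih (fun i hi => h i (by simp [hi]))]

-- the option-max loop of A is a running max
theorem foldl_optmax (f : Nat → Int) (l : List Nat) (a : Int) :
    l.foldl (fun acc j => pvMaxUpd acc (f j)) (some a)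
      = some ((l.map f).foldl max a) := by
  induction l generalizing a with
  | nil => rfl
  | cons x t ih =>
      simp only [List.foldl_cons, List.map_cons]
      have hx : pvMaxUpd (some a) (f x) = some (max a (f x)) := by
        rcases lt_or_ge a (f x) with h | h
        · simp [pvMaxUpd, h, max_eq_right h.le]
        · simp [pvMaxUpd, not_lt.mpr h, max_eq_left h]
      rw [hx, ih]

-- A's per-column minimum (row 0 is scanned twice by A; pvMin_self makes that harmless)
def pvColA (array : List (List Int)) (n j : Nat) : Int :=
  (List.range n).foldl (fun acc i => pvMin acc (pvE array i j)) (pvE array 0 j)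

theorem col_peel (array : List (List Int)) (m j : Nat) :
    pvColA array (m + 1) j
      = (List.range m).foldl (fun acc k => pvMin acc (pvE array (k + 1) j)) (pvE array 0 j) := by
  unfold pvColA
  rw [List.range_succ_eq_map]
  simp [List.foldl_cons, pvMin_self, List.foldl_map]

theorem matrix_eq (n : Nat) (array : List (List Int)) :
    pvArrayMatrix (n : Int) array
      = (List.range n).map (fun i => (List.range n).map (pvE array i)) := by
  unfold pvArrayMatrix pvE
  rw [PySem.List.foldl_append_singleton_eq_map, PySem.List.pyRange_zero_natCast]
  simp [List.map_map, Function.comp_def, PySem.List.pyGet?_natCast, List.getD_eq_getElem?_getD]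

theorem A_char (array : List (List Int)) (m : Nat) :
    mWhile ((m + 1 : Nat) : Int) array
      = ((List.range m).map (fun k => pvColA array (m + 1) (k + 1))).foldl max
          (pvColA array (m + 1) 0) := by
  unfold mWhile
  simp only [matrix_eq]
  have hrow0 : (PySem.List.pyGet? ((List.range (m+1)).map
      (fun i => (List.range (m+1)).map (pvE array i))) 0).getD []
      = (List.range (m+1)).map (pvE array 0) := by
    simp [List.range_succ_eq_map]
  rw [hrow0]
  have hlen : ((List.range (m+1)).map (pvE array 0)).length = m + 1 := by simp
  rw [hlen]
  have hbody : ∀ (acc : Option Int) (j : Nat), j ∈ List.range (m + 1) →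
      pvMaxUpd acc
        (List.foldl
          (fun min_el row =>
            if (PySem.List.pyGet? row (j : Int)).getD 0 < min_el
            then (PySem.List.pyGet? row (j : Int)).getD 0 else min_el)
          ((PySem.List.pyGet? ((List.range (m+1)).map (pvE array 0)) (j : Int)).getD 0)
          ((List.range (m+1)).map (fun i => (List.range (m+1)).map (pvE array i))))
      = pvMaxUpd acc (pvColA array (m + 1) j) := by
    intro acc j hj
    have hjlt : j < m + 1 := List.mem_range.mp hj
    have hget : ∀ i : Nat,
        (PySem.List.pyGet? ((List.range (m+1)).map (pvE array i)) (j : Int)).getD 0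
          = pvE array i j := by
      intro i
      simp [PySem.List.pyGet?_natCast, hjlt]
    simp only [hget, List.foldl_map]
    congr 1
  rw [PySem.List.foldl_congr_mem _ _ _ _ hbody]
  rw [List.range_succ_eq_map, List.foldl_cons]
  have h0 : pvMaxUpd none (pvColA array (m + 1) 0) = some (pvColA array (m + 1) 0) := rfl
  rw [h0, foldl_optmax]
  simp [List.map_map, Function.comp_def, Nat.succ_eq_add_one]

theorem B_char (array : List (List Int)) (m : Nat)
    (h2 : m + 1 ≤ array.length)
    (h3 : ∀ row ∈ array.take (m + 1), m + 1 ≤ row.length) :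
    mWhile_alt ((m + 1 : Nat) : Int) array
      = ((List.range m).map (fun k => pvColA array (m + 1) (k + 1))).foldl max
          (pvColA array (m + 1) 0) := by
  unfold mWhile_alt
  have hc0 : (PySem.List.pyRange 0 ((m + 1 : Nat) : Int)).map
      (fun j => (PySem.List.pyGet? ((PySem.List.pyGet? array 0).getD []) j).getD 0)
      = (List.range (m + 1)).map (fun j => pvE array 0 j) := by
    rw [PySem.List.pyRange_zero_natCast]
    simp [List.map_map, Function.comp_def, PySem.List.pyGet?_zero,
      PySem.List.pyGet?_natCast, pvE, List.getD_eq_getElem?_getD]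
  rw [hc0]
  show (PySem.List.max? ((PySem.List.pyRange 1 ((m + 1 : Nat) : Int)).foldl
      (fun cm i =>
        (PySem.List.enumerate cm).map
          (fun p => if (PySem.List.pyGet? ((PySem.List.pyGet? array i).getD []) p.1).getD 0 < p.2
                    then (PySem.List.pyGet? ((PySem.List.pyGet? array i).getD []) p.1).getD 0
                    else p.2))
      ((List.range (m + 1)).map (fun j => pvE array 0 j))) (fun x => x)).getD 0 = _
  have hlen : ∀ i ∈ PySem.List.pyRange 1 ((m + 1 : Nat) : Int),
      m + 1 ≤ ((PySem.List.pyGet? array i).getD []).length := by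
    intro i hi
    rw [PySem.List.mem_pyRange_one] at hi
    obtain ⟨k, rfl⟩ : ∃ k : Nat, i = (k : Int) := ⟨i.toNat, by omega⟩
    have hk : k < m + 1 := by exact_mod_cast hi.2
    have hkl : k < array.length := lt_of_lt_of_le hk h2
    rw [PySem.List.pyGet?_natCast, List.getElem?_eq_getElem hkl]
    refine h3 array[k] ?_
    have hkt : k < (array.take (m + 1)).length := by simp; omega
    have hmem := List.getElem_mem hkt
    rwa [List.getElem_take] at hmem
  rw [foldl_enum_eq_map array (m + 1) _ hlen (fun j => pvE array 0 j)]
  have hcol : ∀ j : Nat,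
      (PySem.List.pyRange 1 ((m + 1 : Nat) : Int)).foldl
        (fun mm i => pvMin mm (((PySem.List.pyGet? array i).getD []).getD j 0)) (pvE array 0 j)
        = pvColA array (m + 1) j := by
    intro j
    rw [PySem.List.pyRange_one, show ((((m + 1 : Nat) : Int) - 1).toNat) = m by omega,
      List.foldl_map, col_peel]
    have hrow : ∀ k : Nat, ((PySem.List.pyGet? array (1 + (k : Int))).getD []).getD j 0
        = pvE array (k + 1) j := by
      intro k
      rw [show (1 + (k : Int)) = ((k + 1 : Nat) : Int) by push_cast; ring,
        PySem.List.pyGet?_natCast]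
      simp [pvE, List.getD_eq_getElem?_getD]
    simp only [hrow]
  simp only [hcol]
  rw [List.range_succ_eq_map, List.map_cons, PySem.List.max?_id_cons]
  simp [List.map_map, Function.comp_def, Nat.succ_eq_add_one]

-- ===== VERDICT (by name: the statement is the Claim_ definition above) =====
theorem mWhile_spec : Claim_equal_mWhile := by
  intro num array _ hpre
  obtain ⟨h1, h2, h3⟩ := hpre
  unfold Spec_mWhile
  obtain ⟨m, hm⟩ : ∃ m : Nat, num = ((m + 1 : Nat) : Int) := by
    refine ⟨num.toNat - 1, ?_⟩
    omega
  subst hm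
  have h2' : m + 1 ≤ array.length := by exact_mod_cast h2
  have h3' : ∀ row ∈ array.take (m + 1), m + 1 ≤ row.length := by
    intro row hrow
    have := h3 row (by simpa using hrow)
    exact_mod_cast this
  rw [A_char, B_char array m h2' h3']
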